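-- pv_equiv track=rewrite | github.com/einarssons/adventofcode2020 | dec20/m20.py | transform_image
-- ===== SOURCE A (Python) =====
-- def transform_image(img: [str], orientation: int) -> [str]:
--     def rotate90(img: [str]) -> [str]:
--         dim = len(img[0])
--         out = []
--         for i in range(dim):
--             row = []
--             for j in range(dim - 1, -1, -1):
--                 row += img[j][i]
--             out.append("".join(row))
--         return out
--
--     def swap_vertical(img: [str]) -> [str]:
--         out = []
--         for row in img:
--             out.append(row[::-1])
--         return out
--
--     def swap_horizontal(img: [str]) -> [str]:
--         return img[::-1]
--
--     mirror, rotate = divmod(orientation, 4)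
--     if mirror == 1:
--         img = swap_vertical(img)
--     elif mirror == 2:
--         img = swap_horizontal(img)
--     elif mirror == 3:
--         img = swap_vertical(img)
--         img = swap_horizontal(img)
--     for i in range(rotate):
--         img = rotate90(img)
--     return img
-- ===== SOURCE B (Python) =====
-- def transform_image(img: [str], orientation: int) -> [str]:
--     # Build the output directly: each output cell is read from a single source
--     # index via the composed (mirror, rotate) symmetry -- no intermediate grids.
--     mirror, rotate = divmod(orientation, 4)
--     flipv = mirror == 1 or mirror == 3
--     fliph = mirror == 2 or mirror == 3
--     nrows = len(img)
--
--     def cell(a, b):  # character (a, b) of the mirrored image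
--         row = img[nrows - 1 - a] if fliph else img[a]
--         return row[len(row) - 1 - b] if flipv else row[b]
--
--     if rotate == 0:
--         return ["".join(cell(a, b)
--                         for b in range(len(img[nrows - 1 - a] if fliph else img[a])))
--                 for a in range(nrows)]
--     n = len(img[nrows - 1] if fliph else img[0])
--     if rotate == 1:
--         return ["".join(cell(n - 1 - j, i) for j in range(n)) for i in range(n)]
--     if rotate == 2:
--         return ["".join(cell(n - 1 - i, n - 1 - j) for j in range(n)) for i in range(n)]
--     return ["".join(cell(j, n - 1 - i) for j in range(n)) for i in range(n)]
-- ===== Notes on version B (the rewrite author's own statement) =====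
-- stated objective: alternative
-- what changed: B fills the whole output in one double loop, computing each output cell's single source index from the composed (mirror, rotate) symmetry formula, instead of A's sequence of intermediate swapped grids and up to three successive rotate90 passes.
import Mathlib
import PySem

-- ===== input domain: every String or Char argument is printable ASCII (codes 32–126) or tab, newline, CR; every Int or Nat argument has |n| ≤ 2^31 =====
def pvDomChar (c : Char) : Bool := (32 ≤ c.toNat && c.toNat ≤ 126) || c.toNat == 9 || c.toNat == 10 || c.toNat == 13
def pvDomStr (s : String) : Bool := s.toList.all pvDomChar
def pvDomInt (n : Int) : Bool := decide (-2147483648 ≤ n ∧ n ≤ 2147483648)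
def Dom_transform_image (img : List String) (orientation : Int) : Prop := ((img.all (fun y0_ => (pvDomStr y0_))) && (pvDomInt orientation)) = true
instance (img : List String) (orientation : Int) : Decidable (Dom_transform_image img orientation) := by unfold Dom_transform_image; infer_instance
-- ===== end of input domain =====

-- B builds the output in one double loop, reading each output cell directly from a single
-- source index given by the composed (mirror, rotate) symmetry, instead of A's chain of
-- intermediate swapped/rotated grids (objective: alternative decomposition, same cost).

-- ===== PORT A =====
-- rotate90: img[j][i] raises IndexError out of range; ported with default ' ' — exact on Pre_,
-- where every access is in range.
def pvRot90 (img : List String) : List String :=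
  let dim : Int := PySem.Str.len (PySem.List.pyGetD img 0 "")
  (PySem.List.pyRange 0 dim 1).foldl (fun out i =>
    out ++ [String.ofList ((PySem.List.pyRange (dim - 1) (-1) (-1)).foldl
      (fun row j => row ++ [PySem.List.pyGetD (PySem.List.pyGetD img j "").toList i ' ']) [])]) []

def pvSwapV (img : List String) : List String :=
  img.foldl (fun out row => out ++ [(PySem.Str.slice? row none none (-1)).getD ""]) []

def pvSwapH (img : List String) : List String :=
  (PySem.List.slice? img none none (-1)).getD []

def transform_image (img : List String) (orientation : Int) : List String :=
  let mirror := PySem.Int.floordiv orientation 4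
  let rotate := PySem.Int.mod orientation 4
  let img1 :=
    if mirror = 1 then pvSwapV img
    else if mirror = 2 then pvSwapH img
    else if mirror = 3 then pvSwapH (pvSwapV img)
    else img
  (PySem.List.pyRange 0 rotate 1).foldl (fun im _ => pvRot90 im) img1

-- ===== PORT B =====
-- cell a b = character (a,b) of the mirrored image; string indexing ported with default ' '
-- (exact on Pre_, where every access is in range).
def pvCell (img : List String) (flipv fliph : Bool) (a b : Int) : Char :=
  let row := (if fliph then PySem.List.pyGetD img ((img.length : Int) - 1 - a) ""
              else PySem.List.pyGetD img a "").toList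
  if flipv then PySem.List.pyGetD row ((row.length : Int) - 1 - b) ' '
  else PySem.List.pyGetD row b ' '

def transform_image_alt (img : List String) (orientation : Int) : List String :=
  let mirror := PySem.Int.floordiv orientation 4
  let rotate := PySem.Int.mod orientation 4
  let flipv : Bool := mirror = 1 ∨ mirror = 3
  let fliph : Bool := mirror = 2 ∨ mirror = 3
  let nrows : Int := img.length
  if rotate = 0 then
    (PySem.List.pyRange 0 nrows 1).map (fun a =>
      String.ofList ((PySem.List.pyRange 0
          (PySem.Str.len (if fliph then PySem.List.pyGetD img (nrows - 1 - a) ""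
                          else PySem.List.pyGetD img a "")) 1).map
        (fun b => pvCell img flipv fliph a b)))
  else
    let n : Int := PySem.Str.len (if fliph then PySem.List.pyGetD img (nrows - 1) ""
                                  else PySem.List.pyGetD img 0 "")
    if rotate = 1 then
      (PySem.List.pyRange 0 n 1).map (fun i =>
        String.ofList ((PySem.List.pyRange 0 n 1).map (fun j => pvCell img flipv fliph (n - 1 - j) i)))
    else if rotate = 2 then
      (PySem.List.pyRange 0 n 1).map (fun i =>
        String.ofList ((PySem.List.pyRange 0 n 1).map (fun j => pvCell img flipv fliph (n - 1 - i) (n - 1 - j))))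
    else
      (PySem.List.pyRange 0 n 1).map (fun i =>
        String.ofList ((PySem.List.pyRange 0 n 1).map (fun j => pvCell img flipv fliph j (n - 1 - i))))

-- ===== PRECONDITION & SPEC =====
-- Pre_ excludes exactly the inputs on which A raises IndexError: when a rotation is
-- performed (orientation % 4 ≠ 0), the image must be non-empty, the first mirrored row's
-- length n must fit (n ≤ number of rows, each of the first n mirrored rows has length ≥ n),
-- and n = 0 is only allowed for a single rotation (a second rotate90 of an empty grid raises).
def Pre_transform_image (img : List String) (orientation : Int) : Prop :=
  orientation % 4 = 0 ∨
  (img ≠ [] ∧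
    (let rows := if PySem.Int.floordiv orientation 4 = 2 ∨ PySem.Int.floordiv orientation 4 = 3
                 then img.reverse else img
     let n := (rows.headD "").toList.length
     n ≤ img.length ∧ (∀ row ∈ rows.take n, n ≤ row.toList.length) ∧
     (0 < n ∨ orientation % 4 = 1)))
instance (img : List String) (orientation : Int) : Decidable (Pre_transform_image img orientation) := by
  unfold Pre_transform_image; infer_instance

def pvWitness_transform_image : List String × Int := (["ab#", ".#.", "a.b"], 7)

def Spec_transform_image (img : List String) (orientation : Int) (out : List String) : Prop := out = transform_image_alt img orientation
instance (img : List String) (orientation : Int) (out : List String) : Decidable (Spec_transform_image img orientation out) := by unfold Spec_transform_image; infer_instance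

-- ===== CLAIM (what is proved, stated in full; the proofs are below) =====
def Claim_equal_transform_image : Prop := ∀ (img : List String) (orientation : Int), Dom_transform_image img orientation → Pre_transform_image img orientation → Spec_transform_image img orientation (transform_image img orientation)

-- ===== LEMMAS AND PROOFS =====

-- character (a,b) of a grid, with the ports' defaults
def pvGet (g : List String) (a b : Int) : Char :=
  PySem.List.pyGetD (PySem.List.pyGetD g a "").toList b ' '

-- an n × n grid of characters
def pvMkg (n : Nat) (F : Nat → Nat → Char) : List String :=
  (List.range n).map (fun i => String.ofList ((List.range n).map (fun j => F i j)))

-- A's mirrored image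
def pvMirror (img : List String) (mirror : Int) : List String :=
  if mirror = 1 then pvSwapV img
  else if mirror = 2 then pvSwapH img
  else if mirror = 3 then pvSwapH (pvSwapV img)
  else img

-- the row of img that pvCell reads for output row a
def pvSrcRow (img : List String) (fliph : Bool) (a : Int) : List Char :=
  (if fliph then PySem.List.pyGetD img ((img.length : Int) - 1 - a) ""
   else PySem.List.pyGetD img a "").toList

theorem pvSwapV_eq (img : List String) :
    pvSwapV img = img.map (fun r => String.ofList r.toList.reverse) := by
  unfold pvSwapV
  rw [PySem.List.foldl_append_singleton_eq_map]
  simp [PySem.Str.slice?_none_none_neg_one]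

theorem pvSwapH_eq (img : List String) : pvSwapH img = img.reverse := by
  simp [pvSwapH, PySem.List.slice?_none_none_neg_one]

theorem pvMirror_length (img : List String) (mirror : Int) :
    (pvMirror img mirror).length = img.length := by
  unfold pvMirror
  split_ifs <;> simp [pvSwapV_eq, pvSwapH_eq]

theorem pvMirror_row (img : List String) (mirror : Int) (a : Int)
    (h0 : 0 ≤ a) (h1 : a < (img.length : Int)) :
    (PySem.List.pyGetD (pvMirror img mirror) a "").toList =
      (if (mirror = 1 ∨ mirror = 3 : Bool) then (pvSrcRow img (mirror = 2 ∨ mirror = 3) a).reverse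
       else pvSrcRow img (mirror = 2 ∨ mirror = 3) a) := by
  have hrev : ∀ (xs : List String), a < (xs.length : Int) → xs.length = img.length →
      PySem.List.pyGetD xs.reverse a "" = PySem.List.pyGetD xs ((img.length : Int) - 1 - a) "" := by
    intro xs hlt hlen
    rw [PySem.List.pyGetD_eq_getElem _ _ h0 (by simpa using hlt),
        PySem.List.pyGetD_eq_getElem _ _ (by omega) (by omega)]
    rw [List.getElem_reverse]
    congr 1
    omega
  unfold pvMirror pvSrcRow
  rcases eq_or_ne mirror 1 with h1' | h1'
  · subst h1'
    simp only [pvSwapV_eq]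
    norm_num
    rw [show ("" : String) = (fun r : String => String.ofList r.toList.reverse) "" by simp]
    rw [PySem.List.pyGetD_map]
    simp
  · rcases eq_or_ne mirror 2 with h2' | h2'
    · subst h2'
      simp only [pvSwapH_eq]
      norm_num
      rw [hrev img h1 rfl]
    · rcases eq_or_ne mirror 3 with h3' | h3'
      · subst h3'
        simp only [pvSwapH_eq, pvSwapV_eq]
        norm_num
        rw [hrev _ (by simpa using h1) (by simp)]
        rw [show ("" : String) = (fun r : String => String.ofList r.toList.reverse) "" by simp]
        rw [PySem.List.pyGetD_map]
        simp
      · simp [h1', h2', h3']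

theorem pvCell_eq (img : List String) (mirror : Int) (a b : Int)
    (ha0 : 0 ≤ a) (ha1 : a < (img.length : Int))
    (hb0 : 0 ≤ b) (hb1 : b < ((pvSrcRow img (mirror = 2 ∨ mirror = 3) a).length : Int)) :
    pvCell img (mirror = 1 ∨ mirror = 3) (mirror = 2 ∨ mirror = 3) a b =
      pvGet (pvMirror img mirror) a b := by
  unfold pvGet
  rw [pvMirror_row img mirror a ha0 ha1]
  unfold pvCell pvSrcRow at *
  by_cases hv : (mirror = 1 ∨ mirror = 3)
  · simp only [hv, decide_true, if_true]
    rw [PySem.List.pyGetD_eq_getElem _ _ (by omega) (by omega),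
        PySem.List.pyGetD_eq_getElem _ _ hb0 (by simpa using hb1)]
    rw [List.getElem_reverse]
    congr 1
    omega
  · simp only [hv, decide_false]
    simp

theorem pvRot90_eq (g : List String) :
    pvRot90 g = pvMkg (PySem.List.pyGetD g 0 "").toList.length
      (fun i j => pvGet g (((PySem.List.pyGetD g 0 "").toList.length : Int) - 1 - j) i) := by
  unfold pvRot90 pvMkg pvGet
  rw [PySem.List.foldl_append_singleton_eq_map]
  rw [PySem.Str.len_eq, PySem.List.pyRange_one, PySem.List.pyRange_neg_one]
  simp only [List.map_map]
  apply List.map_congr_left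
  intro i _
  simp only [Function.comp_apply]
  rw [PySem.List.foldl_append_singleton_eq_map]
  simp only [List.nil_append]
  apply congrArg
  have hL : (((PySem.List.pyGetD g 0 "").toList.length : Int) - 1 - (-1)).toNat
      = (PySem.List.pyGetD g 0 "").toList.length := by omega
  rw [hL]
  simp only [List.map_map]
  apply List.map_congr_left
  intro k _
  simp only [Function.comp_apply]
  norm_num

theorem pvMkg_congr (n : Nat) (F G : Nat → Nat → Char)
    (h : ∀ i j, i < n → j < n → F i j = G i j) : pvMkg n F = pvMkg n G := by
  unfold pvMkg
  apply List.map_congr_left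
  intro i hi
  congr 1
  apply List.map_congr_left
  intro j hj
  exact h i j (List.mem_range.mp hi) (List.mem_range.mp hj)

theorem pvGet_mkg (n : Nat) (F : Nat → Nat → Char) (a b : Int)
    (ha0 : 0 ≤ a) (ha1 : a < (n : Int)) (hb0 : 0 ≤ b) (hb1 : b < (n : Int)) :
    pvGet (pvMkg n F) a b = F a.toNat b.toNat := by
  unfold pvGet pvMkg
  rw [PySem.List.pyGetD_eq_getElem _ _ ha0 (by simpa using ha1)]
  simp only [List.getElem_map, List.getElem_range]
  rw [show (String.ofList ((List.range n).map (fun j => F a.toNat j))).toList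
        = (List.range n).map (fun j => F a.toNat j) by simp]
  rw [PySem.List.pyGetD_eq_getElem _ _ hb0 (by simpa using hb1)]
  simp

theorem pvMkg_head_len (n : Nat) (F : Nat → Nat → Char) :
    (PySem.List.pyGetD (pvMkg n F) 0 "").toList.length = n := by
  unfold pvMkg
  cases n with
  | zero => simp [PySem.List.pyGetD_zero]
  | succ m =>
    rw [PySem.List.pyGetD_eq_getElem _ _ (by omega) (by simp)]
    simp

theorem pvRot90_mkg (n : Nat) (F : Nat → Nat → Char) :
    pvRot90 (pvMkg n F) = pvMkg n (fun i j => F (n - 1 - j) i) := by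
  rw [pvRot90_eq, pvMkg_head_len]
  apply pvMkg_congr
  intro i j hi hj
  rw [pvGet_mkg _ _ _ _ (by omega) (by omega) (by omega) (by omega)]
  congr 1
  omega

theorem pvMap_pyRange_mkg (n : Nat) (c : Int → Int → Char) :
    (PySem.List.pyRange 0 (n : Int) 1).map (fun i =>
      String.ofList ((PySem.List.pyRange 0 (n : Int) 1).map (fun j => c i j))) =
    pvMkg n (fun i j => c i j) := by
  unfold pvMkg
  rw [PySem.List.pyRange_one]
  simp only [List.map_map]
  simp only [Function.comp_def, zero_add]
  norm_num

theorem pvPyRange_nat (n : Nat) :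
    PySem.List.pyRange 0 (n : Int) 1 = (List.range n).map (fun k : Nat => ((k : Nat) : Int)) := by
  rw [PySem.List.pyRange_one]
  have h : ((n : Int) - 0).toNat = n := by omega
  rw [h]
  simp only [zero_add]

theorem pvB_rot0_eq (img : List String) (m : Int) :
    (PySem.List.pyRange 0 (img.length : Int) 1).map (fun a =>
      String.ofList ((PySem.List.pyRange 0
          (PySem.Str.len (if (m = 2 ∨ m = 3 : Bool) then PySem.List.pyGetD img ((img.length : Int) - 1 - a) ""
                          else PySem.List.pyGetD img a "")) 1).map
        (fun b => pvCell img (m = 1 ∨ m = 3) (m = 2 ∨ m = 3) a b)))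
    = pvMirror img m := by
  rw [pvPyRange_nat]
  apply List.ext_getElem
  · simp [pvMirror_length]
  · intro k hk1 hk2
    have hklen : k < img.length := by simpa using hk1
    simp only [List.getElem_map, List.getElem_range]
    have hrow : PySem.List.pyGetD (pvMirror img m) (k : Int) "" = (pvMirror img m)[k] :=
      PySem.List.pyGetD_eq_getElem _ _ (by omega) (by rw [pvMirror_length]; exact_mod_cast hklen)
    have hR := pvMirror_row img m (k : Int) (by omega) (by exact_mod_cast hklen)
    rw [hrow] at hR
    have hlen : PySem.Str.len (if (m = 2 ∨ m = 3 : Bool)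
        then PySem.List.pyGetD img ((img.length : Int) - 1 - (k : Int)) ""
        else PySem.List.pyGetD img (k : Int) "") = ((pvSrcRow img (m = 2 ∨ m = 3) (k : Int)).length : Int) := by
      rw [PySem.Str.len_eq]
      unfold pvSrcRow
      split_ifs <;> rfl
    rw [hlen, pvPyRange_nat]
    suffices hmap : ((List.range (pvSrcRow img (m = 2 ∨ m = 3) (k : Int)).length).map
          (fun b : Nat => ((b : Nat) : Int))).map
        (fun b => pvCell img (m = 1 ∨ m = 3) (m = 2 ∨ m = 3) (k : Int) b)
        = (pvMirror img m)[k].toList by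
      rw [hmap]; simp
    rw [hR]
    apply List.ext_getElem
    · split_ifs <;> simp
    · intro b hb1 hb2
      have hblen : b < (pvSrcRow img (m = 2 ∨ m = 3) (k : Int)).length := by simpa using hb1
      simp only [List.getElem_map, List.getElem_range]
      rw [pvCell_eq img m (k : Int) (b : Int) (by omega) (by exact_mod_cast hklen)
        (by omega) (by exact_mod_cast hblen)]
      unfold pvGet
      rw [hrow, hR]
      rw [PySem.List.pyGetD_eq_getElem _ _ (by omega) (by
        split_ifs
        · rw [List.length_reverse]; exact_mod_cast hblen
        · exact_mod_cast hblen)]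
      simp

theorem pvSrc_eq (img : List String) (mm : Int) (a : Int)
    (h0 : 0 ≤ a) (h1 : a < (img.length : Int)) :
    pvSrcRow img (mm = 2 ∨ mm = 3) a
      = ((if mm = 2 ∨ mm = 3 then img.reverse else img).getD a.toNat "").toList := by
  unfold pvSrcRow
  by_cases h : mm = 2 ∨ mm = 3
  · simp only [h, decide_true, if_true]
    rw [PySem.List.pyGetD_eq_getElem _ _ (by omega) (by omega)]
    rw [List.getD_eq_getElem _ _ (by simp; omega)]
    rw [List.getElem_reverse]
    have hidx : ((img.length : Int) - 1 - a).toNat = img.length - 1 - a.toNat := by omega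
    simp only [hidx]
  · simp only [h, decide_false, Bool.false_eq_true, if_false]
    rw [PySem.List.pyGetD_eq_getElem _ _ h0 h1]
    rw [List.getD_eq_getElem _ _ (by omega)]

theorem pvN_eq (img : List String) (mm : Int) (hne : img ≠ []) :
    (pvSrcRow img (mm = 2 ∨ mm = 3) 0).length
      = ((if mm = 2 ∨ mm = 3 then img.reverse else img).headD "").toList.length := by
  have hlen : 0 < img.length := List.length_pos_iff.mpr hne
  rw [pvSrc_eq img mm 0 le_rfl (by exact_mod_cast hlen)]
  cases hrows : (if mm = 2 ∨ mm = 3 then img.reverse else img) with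
  | nil =>
    exfalso
    split_ifs at hrows <;> simp_all
  | cons x xs => simp

theorem pvRowlen (img : List String) (mm : Int)
    (hfit : ((if mm = 2 ∨ mm = 3 then img.reverse else img).headD "").toList.length ≤ img.length)
    (htake : ∀ row ∈ (if mm = 2 ∨ mm = 3 then img.reverse else img).take
        ((if mm = 2 ∨ mm = 3 then img.reverse else img).headD "").toList.length,
        ((if mm = 2 ∨ mm = 3 then img.reverse else img).headD "").toList.length ≤ row.toList.length)
    (a : Int) (h0 : 0 ≤ a)
    (h1 : a < (((if mm = 2 ∨ mm = 3 then img.reverse else img).headD "").toList.length : Int)) :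
    ((if mm = 2 ∨ mm = 3 then img.reverse else img).headD "").toList.length
      ≤ (pvSrcRow img (mm = 2 ∨ mm = 3) a).length := by
  set rows := if mm = 2 ∨ mm = 3 then img.reverse else img with hrows
  set nP := (rows.headD "").toList.length with hnP
  have hrl : rows.length = img.length := by rw [hrows]; split_ifs <;> simp
  have ha : a.toNat < nP := by omega
  have halen : a < (img.length : Int) := by omega
  rw [pvSrc_eq img mm a h0 halen]
  have hget : rows.getD a.toNat "" = rows[a.toNat]'(by omega) := List.getD_eq_getElem _ _ (by omega)
  rw [hget]
  apply htake
  have : rows[a.toNat]'(by omega) = (rows.take nP)[a.toNat]'(by simp; omega) :=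
    (List.getElem_take).symm
  rw [this]
  exact List.getElem_mem _

-- ===== VERDICT (by name: the statement is the Claim_ definition above) =====
theorem transform_image_spec : Claim_equal_transform_image := by
  intro img orientation _ hpre
  unfold Spec_transform_image
  have hAe : transform_image img orientation =
      (PySem.List.pyRange 0 (PySem.Int.mod orientation 4) 1).foldl (fun im _ => pvRot90 im)
        (pvMirror img (PySem.Int.floordiv orientation 4)) := rfl
  have hre : PySem.Int.mod orientation 4 = orientation % 4 :=
    PySem.Int.mod_eq_emod_of_pos (by norm_num)
  have hr01 : orientation % 4 = 0 ∨ orientation % 4 = 1 ∨ orientation % 4 = 2 ∨ orientation % 4 = 3 := by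
    omega
  rcases hr01 with hr | hr | hr | hr
  -- r = 0 : no rotation, output is the mirrored image in both ports
  · rw [hAe, hre, hr]
    rw [show PySem.List.pyRange 0 0 1 = [] from by decide]
    simp only [List.foldl_nil]
    simp only [transform_image_alt]
    rw [hre, hr]
    rw [if_pos rfl]
    exact (pvB_rot0_eq img (PySem.Int.floordiv orientation 4)).symm
  all_goals (
    -- r ≥ 1 : the Pre_ shape facts
    have hne : img ≠ [] := by
      rcases hpre with hp0 | ⟨hne, _⟩
      · omega
      · exact hne
    obtain ⟨hfit, htake, _⟩ :
        (let rows := if PySem.Int.floordiv orientation 4 = 2 ∨ PySem.Int.floordiv orientation 4 = 3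
                     then img.reverse else img
         let n := (rows.headD "").toList.length
         n ≤ img.length ∧ (∀ row ∈ rows.take n, n ≤ row.toList.length) ∧
         (0 < n ∨ orientation % 4 = 1)) := by
      rcases hpre with hp0 | ⟨_, hsh⟩
      · omega
      · exact hsh
    set mm := PySem.Int.floordiv orientation 4 with hmm
    set nP := ((if mm = 2 ∨ mm = 3 then img.reverse else img).headD "").toList.length with hnP
    have hlen0 : 0 < img.length := List.length_pos_iff.mpr hne
    have hHead : (PySem.List.pyGetD (pvMirror img mm) 0 "").toList.length = nP := by
      have h := pvMirror_row img mm 0 le_rfl (by exact_mod_cast hlen0)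
      rw [h]
      have h0 := pvN_eq img mm hne
      split_ifs
      · rw [List.length_reverse]; exact h0
      · exact h0
    have hBn : PySem.Str.len (if (mm = 2 ∨ mm = 3 : Bool)
        then PySem.List.pyGetD img ((img.length : Int) - 1) ""
        else PySem.List.pyGetD img 0 "") = (nP : Int) := by
      rw [PySem.Str.len_eq]
      have harg : (if (mm = 2 ∨ mm = 3 : Bool)
          then PySem.List.pyGetD img ((img.length : Int) - 1) ""
          else PySem.List.pyGetD img 0 "").toList = pvSrcRow img (mm = 2 ∨ mm = 3) 0 := by
        unfold pvSrcRow
        norm_num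
      rw [harg]
      exact_mod_cast congrArg (Nat.cast (R := Int)) (pvN_eq img mm hne)
    have hrow : ∀ a : Int, 0 ≤ a → a < (nP : Int) →
        (nP : Int) ≤ ((pvSrcRow img (mm = 2 ∨ mm = 3) a).length : Int) := by
      intro a h0 h1
      exact_mod_cast pvRowlen img mm hfit htake a h0 h1
    have hfit' : (nP : Int) ≤ (img.length : Int) := by exact_mod_cast hfit
    rw [hAe, hre, hr]
    simp only [transform_image_alt]
    rw [hre, hr, ← hmm, hBn]
    try simp only [reduceIte])
  -- r = 1
  · rw [show PySem.List.pyRange 0 1 1 = [0] from by decide]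
    simp only [List.foldl_cons, List.foldl_nil]
    rw [pvRot90_eq (pvMirror img mm), hHead]
    rw [pvMap_pyRange_mkg nP (fun i j => pvCell img (mm = 1 ∨ mm = 3) (mm = 2 ∨ mm = 3)
      ((nP : Int) - 1 - j) i)]
    apply Eq.symm
    apply pvMkg_congr
    intro i j hi hj
    rw [pvCell_eq img mm ((nP : Int) - 1 - (j : Int)) (i : Int)
      (by omega) (by omega) (by omega) (by
        have := hrow ((nP : Int) - 1 - (j : Int)) (by omega) (by omega)
        omega)]
  -- r = 2
  · rw [show PySem.List.pyRange 0 2 1 = [0, 1] from by decide]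
    simp only [List.foldl_cons, List.foldl_nil]
    rw [pvRot90_eq (pvMirror img mm), hHead, pvRot90_mkg]
    rw [pvMap_pyRange_mkg nP (fun i j => pvCell img (mm = 1 ∨ mm = 3) (mm = 2 ∨ mm = 3)
      ((nP : Int) - 1 - i) ((nP : Int) - 1 - j))]
    apply Eq.symm
    apply pvMkg_congr
    intro i j hi hj
    rw [pvCell_eq img mm ((nP : Int) - 1 - (i : Int)) ((nP : Int) - 1 - (j : Int))
      (by omega) (by omega) (by omega) (by
        have := hrow ((nP : Int) - 1 - (i : Int)) (by omega) (by omega)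
        omega)]
    congr 1
    omega
  -- r = 3
  · rw [show PySem.List.pyRange 0 3 1 = [0, 1, 2] from by decide]
    simp only [List.foldl_cons, List.foldl_nil]
    rw [pvRot90_eq (pvMirror img mm), hHead, pvRot90_mkg, pvRot90_mkg]
    rw [pvMap_pyRange_mkg nP (fun i j => pvCell img (mm = 1 ∨ mm = 3) (mm = 2 ∨ mm = 3)
      j ((nP : Int) - 1 - i))]
    apply Eq.symm
    apply pvMkg_congr
    intro i j hi hj
    rw [pvCell_eq img mm (j : Int) ((nP : Int) - 1 - (i : Int))
      (by omega) (by omega) (by omega) (by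
        have := hrow (j : Int) (by omega) (by omega)
        omega)]
    congr 1 <;> omega
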